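-- pv_equiv track=rewrite | github.com/JMKassman/Boilermake17 | app/views.py | calculateFreeTime
-- ===== SOURCE A (Python) =====
-- def calculateFreeTime(arr):
--     free = []
--     for i in range(len(arr)):
--         if arr[i] == True:
--             free.append(i*5)
--     start = []
--     end = []
--     for i in range(len(free)):
--         if i == 0:
--             start.append(free[i])
--         if i > 0 and free[i] != free[i-1]+5:
--             start.append(free[i])
--         if i < len(free)-1 and free[i] != free[i+1]-5:
--             end.append(free[i])
--         if i == len(free)-1:
--             end.append(free[i])
--     return [start, end]
-- ===== SOURCE B (Python) =====
-- def calculateFreeTime(arr):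
--     start = []
--     end = []
--     n = len(arr)
--     for i, v in enumerate(arr):
--         if v == True:
--             if i == 0 or arr[i - 1] != True:
--                 start.append(i * 5)
--             if i == n - 1 or arr[i + 1] != True:
--                 end.append(i * 5)
--     return [start, end]
-- ===== Notes on version B (the rewrite author's own statement) =====
-- stated objective: simpler
-- what changed: B drops A's intermediate list of free offsets and its second index loop over it: one pass over arr detects run starts/ends by looking at the neighbouring slots directly.
import Mathlib
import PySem

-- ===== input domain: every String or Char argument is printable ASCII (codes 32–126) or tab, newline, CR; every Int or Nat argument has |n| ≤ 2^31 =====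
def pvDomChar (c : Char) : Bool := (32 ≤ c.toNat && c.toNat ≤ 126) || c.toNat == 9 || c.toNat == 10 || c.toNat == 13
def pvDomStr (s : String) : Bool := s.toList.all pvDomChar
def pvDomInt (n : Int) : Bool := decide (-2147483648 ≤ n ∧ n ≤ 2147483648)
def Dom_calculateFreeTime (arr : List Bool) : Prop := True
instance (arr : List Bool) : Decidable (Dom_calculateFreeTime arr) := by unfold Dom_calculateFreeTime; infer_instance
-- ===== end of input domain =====

-- B replaces A's intermediate list of free offsets (and the second loop over it) by a single
-- pass over arr that detects run edges from the neighbouring slots; return values proved equal.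

-- ===== PORT A =====
-- first loop: 'for i in range(len(arr)): if arr[i] == True: free.append(i*5)'
-- (arr.getD i false with i < arr.length is exactly Python's arr[i] there)
def pvFreeLoopA (arr : List Bool) : List Int :=
  (List.range arr.length).foldl
    (fun free i => if arr.getD i false == true then free ++ [(i : Int) * 5] else free) []

-- body of the second loop, state (start, end), in Python's branch order
def pvStepA (free : List Int) (se : List Int × List Int) (i : Nat) : List Int × List Int :=
  let start := if i == 0 then se.1 ++ [free.getD i 0] else se.1
  let start := if decide (0 < i) && (free.getD i 0 != free.getD (i - 1) 0 + 5)
               then start ++ [free.getD i 0] else start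
  let «end» := if decide (i < free.length - 1) && (free.getD i 0 != free.getD (i + 1) 0 - 5)
               then se.2 ++ [free.getD i 0] else se.2
  let «end» := if i == free.length - 1 then «end» ++ [free.getD i 0] else «end»
  (start, «end»)

def calculateFreeTime (arr : List Bool) : List (List Int) :=
  let free := pvFreeLoopA arr
  let se := (List.range free.length).foldl (pvStepA free) ([], [])
  [se.1, se.2]

-- ===== PORT B =====
-- loop body of Source B: neighbour lookups arr[i-1] / arr[i+1] are only reached in range
-- (the short-circuit disjunct is true otherwise, and then Lean's total getD agrees)
def pvStepB (arr : List Bool) (se : List Int × List Int) (vi : Bool × Nat) : List Int × List Int :=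
  if vi.1 == true then
    let i := vi.2
    let start := if i == 0 || (arr.getD (i - 1) false != true) then se.1 ++ [(i : Int) * 5] else se.1
    let «end» := if i == arr.length - 1 || (arr.getD (i + 1) false != true) then se.2 ++ [(i : Int) * 5] else se.2
    (start, «end»)
  else se

def calculateFreeTime_alt (arr : List Bool) : List (List Int) :=
  let se := arr.zipIdx.foldl (pvStepB arr) ([], [])
  [se.1, se.2]

-- ===== PRECONDITION & SPEC =====
def Spec_calculateFreeTime (arr : List Bool) (out : List (List Int)) : Prop := out = calculateFreeTime_alt arr
instance (arr : List Bool) (out : List (List Int)) : Decidable (Spec_calculateFreeTime arr out) := by unfold Spec_calculateFreeTime; infer_instance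

-- ===== CLAIM (what is proved, stated in full; the proofs are below) =====
def Claim_equal_calculateFreeTime : Prop := ∀ (arr : List Bool), Dom_calculateFreeTime arr → Spec_calculateFreeTime arr (calculateFreeTime arr)

-- ===== LEMMAS AND PROOFS =====


def freeRec : List Bool → Nat → List Int
  | [], _ => []
  | b :: t, k => (if b then [(k : Int) * 5] else []) ++ freeRec t (k + 1)

def runsS : List Bool → Bool → Nat → List Int
  | [], _, _ => []
  | b :: t, prev, k => (if b && !prev then [(k : Int) * 5] else []) ++ runsS t b (k + 1)

def runsE : List Bool → Nat → List Int
  | [], _ => []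
  | b :: t, k => (if b && !(t.headD false) then [(k : Int) * 5] else []) ++ runsE t (k + 1)

def selS : List Int → Option Int → List Int
  | [], _ => []
  | x :: t, po =>
    (match po with
     | none => [x]
     | some y => if x ≠ y + 5 then [x] else []) ++ selS t (some x)

def selE : List Int → List Int
  | [] => []
  | [x] => [x]
  | x :: y :: t => (if x ≠ y - 5 then [x] else []) ++ selE (y :: t)

theorem freeRec_head_lb (t : List Bool) (m : Nat) (y : Int)
    (h : (freeRec t m).head? = some y) : (m : Int) * 5 ≤ y := by
  induction t generalizing m with
  | nil => simp [freeRec] at h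
  | cons b t ih =>
    cases b with
    | true => simp [freeRec] at h; omega
    | false =>
      rw [show freeRec (false :: t) m = freeRec t (m + 1) from rfl] at h
      have := ih (m + 1) h
      push_cast at this ⊢
      omega

theorem selS_eq_runsS (t : List Bool) (k : Nat) (prev : Bool) (po : Option Int)
    (h1 : po = none → prev = false)
    (h2 : ∀ y, po = some y → y + 5 ≤ (k : Int) * 5 ∧ (prev = true ↔ y + 5 = (k : Int) * 5)) :
    selS (freeRec t k) po = runsS t prev k := by
  induction t generalizing k prev po with
  | nil => simp [freeRec, selS, runsS]
  | cons b t ih =>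
    cases b with
    | false =>
      rw [show freeRec (false :: t) k = freeRec t (k + 1) from rfl,
          show runsS (false :: t) prev k = runsS t false (k + 1) from by simp [runsS]]
      refine ih (k + 1) false po (fun _ => rfl) ?_
      intro y hy
      obtain ⟨hb, hiff⟩ := h2 y hy
      constructor
      · push_cast; omega
      · constructor
        · intro h; exact absurd h (by simp)
        · intro h; push_cast at h; omega
    | true =>
      rw [show freeRec (true :: t) k = (k : Int) * 5 :: freeRec t (k + 1) from rfl,
          show runsS (true :: t) prev k
            = (if !prev then [(k : Int) * 5] else []) ++ runsS t true (k + 1) from by simp [runsS]]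
      have hrec := ih (k + 1) true (some ((k : Int) * 5)) (fun h => nomatch h)
        (by
          intro y hy
          injection hy with hy
          subst hy
          refine ⟨by push_cast; omega, fun _ => by push_cast; ring, fun _ => rfl⟩)
      cases po with
      | none =>
        rw [show selS ((k : Int) * 5 :: freeRec t (k + 1)) none
              = [(k : Int) * 5] ++ selS (freeRec t (k + 1)) (some ((k : Int) * 5)) from rfl,
            hrec, h1 rfl]
        simp
      | some y =>
        rw [show selS ((k : Int) * 5 :: freeRec t (k + 1)) (some y)
              = (if (k : Int) * 5 ≠ y + 5 then [(k : Int) * 5] else [])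
              ++ selS (freeRec t (k + 1)) (some ((k : Int) * 5)) from rfl, hrec]
        congr 1
        obtain ⟨hb, hiff⟩ := h2 y rfl
        cases prev with
        | true =>
          have he : (k : Int) * 5 = y + 5 := (hiff.mp rfl).symm
          simp [he]
        | false =>
          have hne : (k : Int) * 5 ≠ y + 5 := by
            intro hcontra
            have : (false : Bool) = true := hiff.mpr hcontra.symm
            simp at this
          simp [hne]

theorem selE_eq_runsE (t : List Bool) (k : Nat) : selE (freeRec t k) = runsE t k := by
  induction t generalizing k with
  | nil => simp [freeRec, selE, runsE]
  | cons b t ih =>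
    cases b with
    | false =>
      rw [show freeRec (false :: t) k = freeRec t (k + 1) from rfl,
          show runsE (false :: t) k = runsE t (k + 1) from by simp [runsE]]
      exact ih (k + 1)
    | true =>
      cases t with
      | nil => simp [freeRec, selE, runsE]
      | cons c t' =>
        cases c with
        | true =>
          rw [show freeRec (true :: true :: t') k
                = (k : Int) * 5 :: ((k + 1 : Nat) : Int) * 5 :: freeRec t' (k + 1 + 1) from rfl]
          rw [show selE ((k : Int) * 5 :: ((k + 1 : Nat) : Int) * 5 :: freeRec t' (k + 1 + 1))
                = (if (k : Int) * 5 ≠ ((k + 1 : Nat) : Int) * 5 - 5 then [(k : Int) * 5] else [])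
                  ++ selE (((k + 1 : Nat) : Int) * 5 :: freeRec t' (k + 1 + 1)) from rfl]
          rw [if_neg (by push_cast; intro h; apply h; ring)]
          rw [show ((k + 1 : Nat) : Int) * 5 :: freeRec t' (k + 1 + 1)
                = freeRec (true :: t') (k + 1) from rfl]
          rw [ih (k + 1)]
          rw [show runsE (true :: true :: t') k = runsE (true :: t') (k + 1) from by simp [runsE]]
          simp
        | false =>
          have I := ih (k + 1)
          rw [show freeRec (false :: t') (k + 1) = freeRec t' (k + 1 + 1) from rfl] at I
          rw [show freeRec (true :: false :: t') k
                = (k : Int) * 5 :: freeRec t' (k + 1 + 1) from rfl]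
          rw [show runsE (true :: false :: t') k
                = [(k : Int) * 5] ++ runsE (false :: t') (k + 1) from by simp [runsE]]
          cases hr : freeRec t' (k + 1 + 1) with
          | nil =>
            rw [hr] at I
            rw [show selE [(k : Int) * 5] = [(k : Int) * 5] from rfl]
            rw [show selE ([] : List Int) = [] from rfl] at I
            rw [← I]
            simp
          | cons y r =>
            have hy : ((k + 1 + 1 : Nat) : Int) * 5 ≤ y := by
              apply freeRec_head_lb t' (k + 1 + 1)
              rw [hr]; rfl
            have hne : (k : Int) * 5 ≠ y - 5 := by push_cast at hy ⊢; omega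
            rw [hr] at I
            rw [show selE ((k : Int) * 5 :: y :: r)
                  = (if (k : Int) * 5 ≠ y - 5 then [(k : Int) * 5] else []) ++ selE (y :: r) from rfl]
            rw [if_pos hne, I]

theorem freeLoopA_eq (t pre : List Bool) (acc : List Int) :
    (List.range' pre.length t.length).foldl
      (fun acc i => if (pre ++ t).getD i false == true then acc ++ [(i : Int) * 5] else acc) acc
      = acc ++ freeRec t pre.length := by
  induction t generalizing pre acc with
  | nil => simp [freeRec]
  | cons b t ih =>
    rw [List.length_cons, List.range'_succ, List.foldl_cons]
    have hget : (pre ++ b :: t).getD pre.length false = b := by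
      simp [List.getD_eq_getElem?_getD]
    have := ih (pre ++ [b]) (acc ++ if b then [(pre.length : Int) * 5] else [])
    simp only [List.length_append, List.length_cons, List.length_nil, List.append_assoc,
      List.cons_append, List.nil_append] at this
    simp only [hget, freeRec]
    cases b <;> simp_all

theorem stepB_fold_eq (t pre : List Bool) (s e : List Int) :
    (t.zipIdx pre.length).foldl (pvStepB (pre ++ t)) (s, e)
      = (s ++ runsS t (pre.getLastD false) pre.length, e ++ runsE t pre.length) := by
  induction t generalizing pre s e with
  | nil => simp [runsS, runsE]
  | cons b t ih =>
    rw [List.zipIdx_cons, List.foldl_cons]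
    have f1 : ((pre.length == 0) || ((pre ++ b :: t).getD (pre.length - 1) false != true))
        = !pre.getLastD false := by
      cases pre with
      | nil => simp
      | cons p ps =>
        have hlt : (p :: ps).length - 1 < (p :: ps).length := by simp
        have hL : ((p :: ps) ++ b :: t).getD ((p :: ps).length - 1) false
            = (p :: ps).getLastD false := by
          rw [List.getD_eq_getElem?_getD, List.getElem?_append_left hlt,
            List.getLastD_eq_getLast?, List.getLast?_eq_getElem?]
        rw [hL]
        simp
    have f2 : ((pre.length == (pre ++ b :: t).length - 1) || ((pre ++ b :: t).getD (pre.length + 1) false != true))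
        = !(t.headD false) := by
      cases t with
      | nil => simp
      | cons y ts =>
        have h1 : (pre.length == (pre ++ b :: y :: ts).length - 1) = false := by
          rw [beq_eq_false_iff_ne]
          simp
        have h2 : (pre ++ b :: y :: ts).getD (pre.length + 1) false = y := by
          rw [List.getD_eq_getElem?_getD,
            List.getElem?_append_right (by omega : pre.length ≤ pre.length + 1)]
          simp
        rw [h1, h2]
        simp
    have ihb := ih (pre ++ [b])
    simp only [List.getLastD_concat, List.length_append, List.length_cons, List.length_nil,
      List.append_assoc, List.cons_append, List.nil_append] at ihb
    simp only [pvStepB, f1, f2]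
    cases b with
    | false => simp [ihb, runsS, runsE]
    | true =>
      simp only [runsS, runsE]
      cases hp : pre.getLastD false <;> cases ht : t.headD false <;>
        simp [ihb, hp, ht, List.append_assoc]

theorem stepA_fold_eq (t pre : List Int) (s e : List Int) :
    (List.range' pre.length t.length).foldl (pvStepA (pre ++ t)) (s, e)
      = (s ++ selS t pre.getLast?, e ++ selE t) := by
  induction t generalizing pre s e with
  | nil => simp [selS, selE]
  | cons x t ih =>
    rw [List.length_cons, List.range'_succ, List.foldl_cons]
    have g0 : (pre ++ x :: t).getD pre.length 0 = x := by
      simp [List.getD_eq_getElem?_getD, List.getElem?_append_right (le_refl pre.length)]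
    have hstart : (pvStepA (pre ++ x :: t) (s, e) pre.length).1
        = s ++ (match pre.getLast? with
                | none => [x]
                | some y => if x ≠ y + 5 then [x] else []) := by
      cases pre with
      | nil => simp [pvStepA, g0]
      | cons p ps =>
        have hlt : (p :: ps).length - 1 < (p :: ps).length := by simp
        obtain ⟨y, hy⟩ : ∃ y, (p :: ps).getLast? = some y := by
          cases h : (p :: ps).getLast? with
          | none => simp at h
          | some y => exact ⟨y, rfl⟩
        have hy' : (p :: ps)[ps.length]? = some y := by
          rw [List.getLast?_eq_getElem?] at hy
          simpa using hy
        have hG : (p :: (ps ++ x :: t))[ps.length]? = some y := by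
          rw [← List.cons_append, List.getElem?_append_left (by simp)]
          exact hy'
        have hGe : (p :: (ps ++ x :: t))[ps.length]'(by simp) = y := by
          have h := hG
          rw [List.getElem?_eq_getElem (by simp)] at h
          exact Option.some.inj h
        simp [pvStepA, hy, hGe, List.getD_eq_getElem?_getD]
        split <;> simp
    have hend : (pvStepA (pre ++ x :: t) (s, e) pre.length).2
        = e ++ (match x :: t with
                | [] => []
                | [x] => [x]
                | x :: y :: _ => if x ≠ y - 5 then [x] else []) := by
      cases t with
      | nil =>
        have hc : (pre.length == (pre ++ [x]).length - 1) = true := by simp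
        simp [pvStepA, g0, hc]
      | cons y ts =>
        have hc4 : (pre.length == (pre ++ x :: y :: ts).length - 1) = false := by
          rw [beq_eq_false_iff_ne]; simp
        have hc3 : decide (pre.length < (pre ++ x :: y :: ts).length - 1) = true := by
          simp
        have h2 : (pre ++ x :: y :: ts).getD (pre.length + 1) 0 = y := by
          rw [List.getD_eq_getElem?_getD,
            List.getElem?_append_right (by omega : pre.length ≤ pre.length + 1)]
          simp
        by_cases hxy : x = y - 5 <;>
          simp [pvStepA, g0, hc3, hc4, h2, hxy]
    have ihb := ih (pre ++ [x]) (pvStepA (pre ++ x :: t) (s, e) pre.length).1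
      (pvStepA (pre ++ x :: t) (s, e) pre.length).2
    simp only [List.getLast?_concat, List.length_append, List.length_cons, List.length_nil,
      List.append_assoc, List.cons_append, List.nil_append] at ihb
    rw [show (pvStepA (pre ++ x :: t) (s, e) pre.length)
        = ((pvStepA (pre ++ x :: t) (s, e) pre.length).1,
           (pvStepA (pre ++ x :: t) (s, e) pre.length).2) from rfl] at ihb ⊢
    rw [ihb, hstart, hend]
    cases t with
    | nil => simp [selS, selE]
    | cons y ts => simp [selS, selE, List.append_assoc]

theorem freeLoopA_done (arr : List Bool) : pvFreeLoopA arr = freeRec arr 0 := by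
  have h1 := freeLoopA_eq arr [] []
  simp only [List.nil_append, List.length_nil] at h1
  unfold pvFreeLoopA
  rw [List.range_eq_range']
  exact h1

theorem calcA_eq (arr : List Bool) :
    calculateFreeTime arr = [runsS arr false 0, runsE arr 0] := by
  simp only [calculateFreeTime, freeLoopA_done]
  have h2 := stepA_fold_eq (freeRec arr 0) [] [] []
  simp only [List.nil_append, List.length_nil, List.getLast?_nil] at h2
  rw [List.range_eq_range', h2,
    selS_eq_runsS arr 0 false none (fun _ => rfl) (fun y hy => nomatch hy),
    selE_eq_runsE arr 0]

theorem calcB_eq (arr : List Bool) :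
    calculateFreeTime_alt arr = [runsS arr false 0, runsE arr 0] := by
  simp only [calculateFreeTime_alt]
  have h := stepB_fold_eq arr [] [] []
  simp only [List.nil_append, List.length_nil, List.getLastD_nil] at h
  rw [h]

-- ===== VERDICT (by name: the statement is the Claim_ definition above) =====
theorem calculateFreeTime_spec : Claim_equal_calculateFreeTime := by
  intro arr _
  unfold Spec_calculateFreeTime
  rw [calcA_eq, calcB_eq]
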